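-- pv_equiv track=rewrite | github.com/Master-Lian/ai-efficiency-engineer | ai-parse/rag/5gNR_Agents_Sys/skills/metric_collect.py | _detect_consecutive_loss
-- ===== SOURCE A (Python) =====
-- from typing import Any, Dict, List, Optional
--
-- def _detect_consecutive_loss(seq_numbers: List[int]) -> int:
--     """检测连续丢包次数"""
--     if len(seq_numbers) < 2:
--         return 0
--
--     consecutive = 0
--     max_consecutive = 0
--
--     for i in range(1, len(seq_numbers)):
--         if seq_numbers[i] - seq_numbers[i - 1] > 1:
--             consecutive += 1
--             max_consecutive = max(max_consecutive, consecutive)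
--         else:
--             consecutive = 0
--
--     return max_consecutive
-- ===== SOURCE B (Python) =====
-- from typing import List
--
--
-- def _detect_consecutive_loss(seq_numbers: List[int]) -> int:
--     """检测连续丢包次数"""
--     if len(seq_numbers) < 2:
--         return 0
--     # positions (of the adjacent pair) where the sequence does NOT jump: run separators
--     resets = [k for k, (a, b) in enumerate(zip(seq_numbers, seq_numbers[1:])) if b - a <= 1]
--     bounds = [-1] + resets + [len(seq_numbers) - 1]
--     # the longest jump-run is the largest distance between consecutive separators, minus 1
--     return max(b - a - 1 for a, b in zip(bounds, bounds[1:]))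
-- ===== Notes on version B (the rewrite author's own statement) =====
-- stated objective: alternative
-- what changed: Instead of A's streaming counter-and-running-max loop, B collects the separator positions (adjacent pairs that do NOT jump), brackets them with sentinels -1 and len-1, and returns the largest distance between consecutive separators minus 1.
import Mathlib
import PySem

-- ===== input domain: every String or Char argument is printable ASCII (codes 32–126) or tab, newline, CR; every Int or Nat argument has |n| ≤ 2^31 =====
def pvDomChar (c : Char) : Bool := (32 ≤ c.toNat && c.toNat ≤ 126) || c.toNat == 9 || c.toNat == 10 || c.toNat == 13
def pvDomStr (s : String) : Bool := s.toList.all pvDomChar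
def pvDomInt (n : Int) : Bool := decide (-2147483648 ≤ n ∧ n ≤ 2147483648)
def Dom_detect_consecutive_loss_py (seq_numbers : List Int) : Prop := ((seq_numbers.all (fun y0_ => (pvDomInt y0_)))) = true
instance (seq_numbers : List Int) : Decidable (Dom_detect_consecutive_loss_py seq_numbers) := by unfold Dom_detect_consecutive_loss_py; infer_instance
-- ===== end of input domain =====

-- B replaces A's streaming counter/running-max loop by separator arithmetic: collect the positions
-- of non-jump pairs, bracket with sentinels, and take the largest distance between consecutive
-- separators minus 1 (objective: alternative; same cost).

-- ===== PORT A =====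
-- s[i] / s[i-1] via pyGetD is exact here: every index i drawn from range(1, len) is in range, so Python never raises.
def detect_consecutive_loss_py (seq_numbers : List Int) : Int :=
  if seq_numbers.length < 2 then 0
  else
    let r := (PySem.List.pyRange 1 (seq_numbers.length : Int) 1).foldl
      (fun (st : Int × Int) i =>
        if PySem.List.pyGetD seq_numbers i 0 - PySem.List.pyGetD seq_numbers (i - 1) 0 > 1 then
          (st.1 + 1, max st.2 (st.1 + 1))
        else
          (0, st.2)) (0, 0)
    r.2

-- ===== PORT B =====
-- the list comprehension '[k for k, (a, b) in enumerate(zip(s, s[1:])) if b - a <= 1]'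
-- 'max(...)' over the nonempty generator is rendered totally as max? … |>.getD 0; the
-- bounds pair list always yields at least one element, so the default is never used.
def detect_consecutive_loss_py_alt (seq_numbers : List Int) : Int :=
  if seq_numbers.length < 2 then 0
  else
    let resets := (PySem.List.enumerate (seq_numbers.zip seq_numbers.tail) 0).filterMap
      (fun kp => if kp.2.2 - kp.2.1 ≤ 1 then some kp.1 else none)
    let bounds := -1 :: (resets ++ [(seq_numbers.length : Int) - 1])
    (PySem.List.max? ((bounds.zip bounds.tail).map (fun q => q.2 - q.1 - 1)) (fun y => y)).getD 0

-- ===== PRECONDITION & SPEC =====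
def Spec_detect_consecutive_loss_py (seq_numbers : List Int) (out : Int) : Prop := out = detect_consecutive_loss_py_alt seq_numbers
instance (seq_numbers : List Int) (out : Int) : Decidable (Spec_detect_consecutive_loss_py seq_numbers out) := by unfold Spec_detect_consecutive_loss_py; infer_instance

-- ===== CLAIM (what is proved, stated in full; the proofs are below) =====
def Claim_equal_detect_consecutive_loss_py : Prop := ∀ (seq_numbers : List Int), Dom_detect_consecutive_loss_py seq_numbers → Spec_detect_consecutive_loss_py seq_numbers (detect_consecutive_loss_py seq_numbers)

-- ===== LEMMAS AND PROOFS =====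

-- A's index loop over range(1, len) is the fold of the step over consecutive pairs.
theorem foldl_pyRange_pairs {σ : Type} (F : σ → Int → Int → σ) (s : List Int) :
    ∀ (a : Nat) (init : σ),
      (PySem.List.pyRange ((a : Int) + 1) (s.length : Int) 1).foldl
          (fun st i => F st (PySem.List.pyGetD s (i - 1) 0) (PySem.List.pyGetD s i 0)) init
        = ((s.drop a).zip (s.drop (a + 1))).foldl (fun st p => F st p.1 p.2) init := by
  suffices H : ∀ (n a : Nat) (init : σ), s.length - a ≤ n →
      (PySem.List.pyRange ((a : Int) + 1) (s.length : Int) 1).foldl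
          (fun st i => F st (PySem.List.pyGetD s (i - 1) 0) (PySem.List.pyGetD s i 0)) init
        = ((s.drop a).zip (s.drop (a + 1))).foldl (fun st p => F st p.1 p.2) init by
    intro a init
    exact H s.length a init (by omega)
  intro n
  induction n with
  | zero =>
    intro a init h
    have ha : s.length ≤ a := by omega
    rw [PySem.List.pyRange_one_eq_nil (by omega), List.drop_eq_nil_of_le ha]
    rfl
  | succ n ih =>
    intro a init h
    by_cases hlt : a + 1 < s.length
    · have ha : a < s.length := by omega
      rw [PySem.List.pyRange_one_cons (by omega), List.foldl_cons]
      have e1 : ((a : Int) + 1) - 1 = ((a : Nat) : Int) := by ring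
      have e2 : ((a : Int) + 1) = ((a + 1 : Nat) : Int) := by push_cast; ring
      rw [e1, e2, PySem.List.pyGetD_natCast, PySem.List.pyGetD_natCast]
      rw [List.drop_eq_getElem_cons ha, List.drop_eq_getElem_cons hlt, List.zip_cons_cons,
        List.foldl_cons]
      rw [List.getD_eq_getElem s 0 ha, List.getD_eq_getElem s 0 hlt]
      have := ih (a + 1) (F init s[a] s[a + 1]) (by omega)
      rw [List.drop_eq_getElem_cons hlt] at this
      push_cast at this ⊢
      exact this
    · have ha : s.length ≤ a + 1 := by omega
      rw [PySem.List.pyRange_one_eq_nil (by omega), List.drop_eq_nil_of_le ha,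
        List.zip_nil_right]
      rfl

-- A's running-max loop, characterised by an auxiliary recursion on the gap-flag list
def pvAux : List Bool → Int → Int
  | [], _ => 0
  | true :: t, c => max (c + 1) (pvAux t (c + 1))
  | false :: t, _ => pvAux t 0

theorem pvAux_nonneg : ∀ (l : List Bool) (c : Int), 0 ≤ pvAux l c := by
  intro l
  induction l with
  | nil => intro c; simp [pvAux]
  | cons b t ih =>
    intro c
    cases b
    · simp only [pvAux]; exact ih 0
    · simp only [pvAux, le_max_iff]; exact Or.inr (ih (c + 1))

theorem foldl_step_eq_aux : ∀ (l : List Bool) (c m : Int), 0 ≤ m →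
    (l.foldl (fun (st : Int × Int) f =>
        if f = true then (st.1 + 1, max st.2 (st.1 + 1)) else (0, st.2)) (c, m)).2
      = max m (pvAux l c) := by
  intro l
  induction l with
  | nil => intro c m hm; simp [pvAux]; omega
  | cons b t ih =>
    intro c m hm
    cases b
    · simpa [pvAux] using ih 0 m hm
    · rw [List.foldl_cons, if_pos rfl, ih (c + 1) (max m (c + 1)) (by omega)]
      simp only [pvAux]
      omega

-- positions (from index i) of the 'false' flags = B's separator positions
def pvFalseIdx : List Bool → Int → List Int
  | [], _ => []
  | true :: t, i => pvFalseIdx t (i + 1)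
  | false :: t, i => i :: pvFalseIdx t (i + 1)

theorem mem_pvFalseIdx_ge : ∀ (l : List Bool) (i x : Int), x ∈ pvFalseIdx l i → i ≤ x := by
  intro l
  induction l with
  | nil => intro i x hx; simp [pvFalseIdx] at hx
  | cons b t ih =>
    intro i x hx
    cases b
    · simp only [pvFalseIdx, List.mem_cons] at hx
      rcases hx with rfl | hx
      · omega
      · have := ih (i + 1) x hx; omega
    · have := ih (i + 1) x (by simpa [pvFalseIdx] using hx); omega

-- B's comprehension over enumerate(zip(...)) computes exactly the false positions of the flags
theorem enumerate_filterMap_eq_falseIdx :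
    ∀ (pairs : List (Int × Int)) (s : Int),
      (PySem.List.enumerate pairs s).filterMap
          (fun kp => if kp.2.2 - kp.2.1 ≤ 1 then some kp.1 else none)
        = pvFalseIdx (pairs.map (fun p => decide (p.2 - p.1 > 1))) s := by
  intro pairs
  induction pairs with
  | nil => intro s; simp [PySem.List.enumerate_nil, pvFalseIdx]
  | cons p t ih =>
    intro s
    rw [PySem.List.enumerate_cons, List.filterMap_cons, List.map_cons]
    by_cases h : p.2 - p.1 ≤ 1
    · have hf : decide (p.2 - p.1 > 1) = false := by simp; omega
      rw [if_pos h, hf]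
      simp only [pvFalseIdx, ih]
    · have hf : decide (p.2 - p.1 > 1) = true := by simp; omega
      rw [if_neg h, hf]
      simp only [pvFalseIdx, ih]

-- adjacent-difference list of the boundary list
def pvDiffs : Int → List Int → List Int
  | _, [] => []
  | p, x :: t => (x - p - 1) :: pvDiffs x t

theorem zip_map_eq_pvDiffs : ∀ (rest : List Int) (p : Int),
    ((p :: rest).zip rest).map (fun q => q.2 - q.1 - 1) = pvDiffs p rest := by
  intro rest
  induction rest with
  | nil => intro p; rfl
  | cons x t ih =>
    intro p
    simp only [List.zip_cons_cons, List.map_cons, pvDiffs]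
    rw [← ih x]

-- the key invariant: max over the boundary differences = A's running-max recursion
theorem pvDiffs_foldl_max : ∀ (l : List Bool) (i p a : Int), p < i →
    (pvDiffs p (pvFalseIdx l i ++ [i + (l.length : Int)])).foldl max a
      = max a (max (i - p - 1) (pvAux l (i - p - 1))) := by
  intro l
  induction l with
  | nil =>
    intro i p a hp
    simp only [pvFalseIdx, List.nil_append, pvDiffs, List.foldl_cons, List.foldl_nil,
      List.length_nil, Int.natCast_zero, add_zero, pvAux]
    omega
  | cons b t ih =>
    intro i p a hp
    cases b
    · simp only [pvFalseIdx, List.cons_append, pvDiffs, List.foldl_cons, List.length_cons]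
      have heq : i + ((t.length + 1 : Nat) : Int) = (i + 1) + (t.length : Int) := by
        push_cast; ring
      rw [heq, ih (i + 1) i (max a (i - p - 1)) (by omega)]
      simp only [pvAux]
      have he0 : i + 1 - i - 1 = (0 : Int) := by ring
      rw [he0]
      have h0 : 0 ≤ pvAux t 0 := pvAux_nonneg t 0
      generalize pvAux t 0 = X at *
      omega
    · simp only [pvFalseIdx, List.length_cons]
      have heq : i + ((t.length + 1 : Nat) : Int) = (i + 1) + (t.length : Int) := by
        push_cast; ring
      rw [heq, ih (i + 1) p a (by omega)]
      simp only [pvAux]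
      have he : i + 1 - p - 1 = i - p - 1 + 1 := by ring
      rw [he]
      have h1 : 0 ≤ pvAux t (i - p - 1 + 1) := pvAux_nonneg t _
      generalize pvAux t (i - p - 1 + 1) = X at *
      omega

-- ===== VERDICT (by name: the statement is the Claim_ definition above) =====
theorem detect_consecutive_loss_py_spec : Claim_equal_detect_consecutive_loss_py := by
  intro s _
  unfold Spec_detect_consecutive_loss_py
  unfold detect_consecutive_loss_py detect_consecutive_loss_py_alt
  by_cases hlen : s.length < 2
  · rw [if_pos hlen, if_pos hlen]
  · rw [if_neg hlen, if_neg hlen]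
    -- A's side: loop = max 0 (pvAux flags 0)
    have hzip := foldl_pyRange_pairs
      (fun st x y => if y - x > 1 then (st.1 + 1, max st.2 (st.1 + 1)) else ((0 : Int), st.2))
      s 0 ((0 : Int), (0 : Int))
    simp only [Nat.cast_zero, zero_add, List.drop_zero, List.drop_one] at hzip
    have hmap : ((s.zip s.tail).map (fun p => decide (p.2 - p.1 > 1))).foldl
        (fun (st : Int × Int) f => if f = true then (st.1 + 1, max st.2 (st.1 + 1)) else (0, st.2))
        ((0 : Int), (0 : Int))
        = (s.zip s.tail).foldl
            (fun (st : Int × Int) p =>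
              if p.2 - p.1 > 1 then (st.1 + 1, max st.2 (st.1 + 1)) else (0, st.2))
            ((0 : Int), (0 : Int)) := by
      rw [List.foldl_map]
      simp
    set flags := (s.zip s.tail).map (fun p => decide (p.2 - p.1 > 1)) with hflags
    have hA : ((PySem.List.pyRange 1 (s.length : Int) 1).foldl
        (fun (st : Int × Int) i =>
          if PySem.List.pyGetD s i 0 - PySem.List.pyGetD s (i - 1) 0 > 1 then
            (st.1 + 1, max st.2 (st.1 + 1))
          else
            (0, st.2)) (0, 0)).2 = pvAux flags 0 := by
      rw [hzip, ← hmap, foldl_step_eq_aux _ 0 0 le_rfl, max_eq_right (pvAux_nonneg _ 0)]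
    rw [hA]
    -- B's side
    dsimp only
    rw [enumerate_filterMap_eq_falseIdx, ← hflags]
    have hflen : (flags.length : Int) = (s.length : Int) - 1 := by
      rw [hflags]
      rw [List.length_map, List.length_zip, List.length_tail]
      omega
    have hbounds : pvFalseIdx flags 0 ++ [(s.length : Int) - 1]
        = pvFalseIdx flags 0 ++ [(0 : Int) + (flags.length : Int)] := by
      rw [hflen]; ring_nf
    rw [List.tail_cons, zip_map_eq_pvDiffs, hbounds]
    rcases hd : pvDiffs (-1) (pvFalseIdx flags 0 ++ [(0 : Int) + (flags.length : Int)])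
        with _ | ⟨d, rest⟩
    · exfalso
      rcases hfi : pvFalseIdx flags 0 with _ | ⟨x, t⟩ <;>
        simp [hfi, pvDiffs] at hd
    · have hd0 : 0 ≤ d := by
        rcases hfi : pvFalseIdx flags 0 with _ | ⟨x, t⟩
        · rw [hfi] at hd
          simp only [List.nil_append, pvDiffs] at hd
          have : 0 + (flags.length : Int) - (-1) - 1 = d := by
            injection hd with h1 _
          omega
        · rw [hfi] at hd
          simp only [List.cons_append, pvDiffs] at hd
          have hx : (0 : Int) ≤ x := mem_pvFalseIdx_ge flags 0 x (by rw [hfi]; exact List.mem_cons_self ..)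
          have : x - (-1) - 1 = d := by injection hd with h1 _
          omega
      rw [PySem.List.max?_id_cons, Option.getD_some]
      have hfold : rest.foldl max d = (d :: rest).foldl max 0 := by
        simp only [List.foldl_cons]
        rw [max_eq_right hd0]
      rw [hfold, ← hd, pvDiffs_foldl_max flags 0 (-1) 0 (by omega)]
      have h0 : 0 ≤ pvAux flags 0 := pvAux_nonneg flags 0
      have he : (0 : Int) - (-1) - 1 = 0 := by ring
      rw [he]
      omega
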